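-- pv_equiv track=rewrite | github.com/sshyran/openvino-action-recognition-mmaction2 | tools/data/enhance_annotation.py | merge_closest
-- ===== SOURCE A (Python) =====
-- from copy import deepcopy
--
-- def merge_closest(segments, max_distance=1):
--     out_data = []
--
--     last_segment = None
--     for segment in segments:
--         if last_segment is None:
--             last_segment = deepcopy(segment)
--         else:
--             last_end = last_segment[1]
--             cur_start = segment[0]
--             if cur_start - last_end <= max_distance:
--                 last_segment[1] = segment[1]
--             else:
--                 out_data.append(last_segment)
--                 last_segment = deepcopy(segment)
--
--     if last_segment is not None:
--         out_data.append(last_segment)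
--
--     return out_data
-- ===== SOURCE B (Python) =====
-- from copy import deepcopy
--
-- def merge_closest(segments, max_distance=1):
--     # Pass 1: split into runs of consecutive close segments.
--     runs = []
--     cur = []
--     for seg in segments:
--         if cur and seg[0] - cur[-1][1] <= max_distance:
--             cur.append(seg)
--         else:
--             if cur:
--                 runs.append(cur)
--             cur = [seg]
--     if cur:
--         runs.append(cur)
--     # Pass 2: collapse each run into one merged segment.
--     out = []
--     for run in runs:
--         merged = deepcopy(run[0])
--         if len(run) > 1:
--             merged[1] = run[-1][1]
--         out.append(merged)
--     return out
-- ===== Notes on version B (the rewrite author's own statement) =====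
-- stated objective: alternative
-- what changed: B replaces A's single fused loop with mutable running state by a two-pass decomposition: first group the segments into runs of consecutive close segments, then map each run to one merged segment (copy of the run's head, end overwritten by the run's last end only for multi-element runs).
import Mathlib
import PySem

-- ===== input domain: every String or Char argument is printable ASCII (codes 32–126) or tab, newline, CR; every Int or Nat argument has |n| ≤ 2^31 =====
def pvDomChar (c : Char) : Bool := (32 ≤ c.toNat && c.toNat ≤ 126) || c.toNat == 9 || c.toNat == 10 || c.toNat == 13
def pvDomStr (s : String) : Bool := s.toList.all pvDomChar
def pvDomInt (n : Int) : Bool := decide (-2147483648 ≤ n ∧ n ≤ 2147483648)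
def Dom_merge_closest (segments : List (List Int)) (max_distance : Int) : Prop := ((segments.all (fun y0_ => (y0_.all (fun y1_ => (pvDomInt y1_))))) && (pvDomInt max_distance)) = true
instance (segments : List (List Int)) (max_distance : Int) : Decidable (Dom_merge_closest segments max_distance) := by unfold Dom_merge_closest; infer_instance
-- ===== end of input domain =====

-- B replaces A's single fused merge loop by a two-pass decomposition (group segments into runs, then map each run to one merged segment); objective: alternative, same O(n) cost.

-- ===== PORT A =====
-- A: one fused loop carrying the current merged segment, extending it in place.
-- Index reads/writes are via getD/set with default 0/no-op; Pre_ guarantees they are in range,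
-- matching Python exactly on the admitted inputs (Python raises outside Pre_).
def mergeA (max_distance : Int) : List (List Int) → List Int → List (List Int)
  | [], ls => [ls]
  | seg :: rest, ls =>
      if seg.getD 0 0 - ls.getD 1 0 ≤ max_distance then
        mergeA max_distance rest (ls.set 1 (seg.getD 1 0))
      else
        ls :: mergeA max_distance rest seg

def merge_closest (segments : List (List Int)) (max_distance : Int) : List (List Int) :=
  match segments with
  | [] => []
  | s :: rest => mergeA max_distance rest s

-- ===== PORT B =====
-- B pass 1: split the segments into runs of consecutive close segments (cur is the open run, nonempty).
def runsB (max_distance : Int) : List (List Int) → List (List Int) → List (List (List Int))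
  | [], cur => [cur]
  | seg :: rest, cur =>
      if seg.getD 0 0 - ((cur.getLast?.getD []).getD 1 0) ≤ max_distance then
        runsB max_distance rest (cur ++ [seg])
      else
        cur :: runsB max_distance rest [seg]

-- B pass 2: collapse one run into a single merged segment.
def mergedRun (run : List (List Int)) : List Int :=
  if 1 < run.length then (run.headD []).set 1 ((run.getLast?.getD []).getD 1 0)
  else run.headD []

def merge_closest_alt (segments : List (List Int)) (max_distance : Int) : List (List Int) :=
  match segments with
  | [] => []
  | s :: rest => (runsB max_distance rest [s]).map mergedRun

-- ===== PRECONDITION & SPEC =====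
-- Pre_ = exactly the inputs on which the Python A returns (no IndexError): every non-last
-- segment has >= 2 entries, and with >= 2 segments the last one is nonempty and is either of
-- length >= 2 or too far from its predecessor to be merged (so its [1] is never read/written).
def Pre_merge_closest (segments : List (List Int)) (max_distance : Int) : Prop :=
  (∀ s ∈ segments.dropLast, 2 ≤ s.length) ∧
  (2 ≤ segments.length →
    (1 ≤ (segments.getLast?.getD []).length ∧
      (2 ≤ (segments.getLast?.getD []).length ∨
        max_distance < (segments.getLast?.getD []).getD 0 0
                        - (segments.getD (segments.length - 2) []).getD 1 0)))
instance (segments : List (List Int)) (max_distance : Int) : Decidable (Pre_merge_closest segments max_distance) := by unfold Pre_merge_closest; infer_instance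

def pvWitness_merge_closest : List (List Int) × Int := ([[1, 3], [4, 6], [9, 10]], 1)

def Spec_merge_closest (segments : List (List Int)) (max_distance : Int) (out : List (List Int)) : Prop := out = merge_closest_alt segments max_distance
instance (segments : List (List Int)) (max_distance : Int) (out : List (List Int)) : Decidable (Spec_merge_closest segments max_distance out) := by unfold Spec_merge_closest; infer_instance

-- ===== CLAIM (what is proved, stated in full; the proofs are below) =====
def Claim_equal_merge_closest : Prop := ∀ (segments : List (List Int)) (max_distance : Int), Dom_merge_closest segments max_distance → Pre_merge_closest segments max_distance → Spec_merge_closest segments max_distance (merge_closest segments max_distance)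

-- ===== LEMMAS AND PROOFS =====

lemma mergedRun_singleton (s : List Int) : mergedRun [s] = s := by
  simp [mergedRun]

lemma mergedRun_append (cur : List (List Int)) (seg : List Int) (h : cur ≠ []) :
    mergedRun (cur ++ [seg]) = (mergedRun cur).set 1 (seg.getD 1 0) := by
  cases cur with
  | nil => exact absurd rfl h
  | cons c cs =>
    cases cs with
    | nil => simp [mergedRun]
    | cons a b =>
      simp [mergedRun, List.set_set]
      rw [show (a :: (b ++ [seg])).getLast? = some seg by
            exact List.getLast?_concat (l := a :: b)]
      simp

lemma getD_one_mergedRun (cur : List (List Int)) (hne : cur ≠ [])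
    (hhead : 2 ≤ (cur.headD []).length) :
    (mergedRun cur).getD 1 0 = (cur.getLast?.getD []).getD 1 0 := by
  cases cur with
  | nil => exact absurd rfl hne
  | cons c cs =>
    simp only [List.headD_cons] at hhead
    cases cs with
    | nil => simp [mergedRun]
    | cons a b =>
      simp only [mergedRun, List.length_cons, List.headD_cons]
      rw [if_pos (by simp)]
      rw [List.getD_eq_getElem?_getD, List.getElem?_set_self (by omega : 1 < c.length)]
      simp

lemma mem_cons_dropLast {α : Type} (x : α) (l : List α) (s : α)
    (h : s ∈ l.dropLast) : s ∈ (x :: l).dropLast := by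
  cases l with
  | nil => simp at h
  | cons a b => simpa using Or.inr h

-- Main loop invariant: A's running merged segment equals mergedRun of B's open run.
lemma key (max_distance : Int) :
    ∀ (rest cur : List (List Int)), cur ≠ [] →
    (1 < cur.length → 2 ≤ (cur.headD []).length) →
    (∀ s ∈ rest.dropLast, 2 ≤ s.length) →
    (rest ≠ [] → ∀ s ∈ cur, 2 ≤ s.length) →
    mergeA max_distance rest (mergedRun cur)
      = (runsB max_distance rest cur).map mergedRun := by
  intro rest
  induction rest with
  | nil =>
    intro cur hne _ _ _
    simp [mergeA, runsB]
  | cons seg rest ih =>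
    intro cur hne hhead hdrop hall
    have hcurlen : ∀ s ∈ cur, 2 ≤ s.length := hall (by simp)
    have hheadlen : 2 ≤ (cur.headD []).length := by
      cases cur with
      | nil => exact absurd rfl hne
      | cons c cs => exact hcurlen c (by simp)
    have hcmp : (mergedRun cur).getD 1 0 = (cur.getLast?.getD []).getD 1 0 :=
      getD_one_mergedRun cur hne hheadlen
    simp only [mergeA, runsB, hcmp]
    by_cases hc : seg.getD 0 0 - (cur.getLast?.getD []).getD 1 0 ≤ max_distance
    · simp only [if_pos hc]
      rw [← mergedRun_append cur seg hne]
      apply ih (cur ++ [seg]) (by simp)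
      · intro _
        cases cur with
        | nil => exact absurd rfl hne
        | cons c cs => simpa using hheadlen
      · intro s hs
        exact hdrop s (mem_cons_dropLast seg rest s hs)
      · intro hrne s hs
        rcases List.mem_append.mp hs with h | h
        · exact hcurlen s h
        · simp at h
          have hseg : seg ∈ (seg :: rest).dropLast := by
            cases rest with
            | nil => exact absurd rfl hrne
            | cons a b => simp
          rw [h]; exact hdrop seg hseg
    · simp only [if_neg hc, List.map_cons]
      congr 1
      rw [← mergedRun_singleton seg]
      apply ih [seg] (by simp) (by simp)
      · intro s hs
        exact hdrop s (mem_cons_dropLast seg rest s hs)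
      · intro hrne s hs
        simp at hs
        have hseg : seg ∈ (seg :: rest).dropLast := by
          cases rest with
          | nil => exact absurd rfl hrne
          | cons a b => simp
        rw [hs]; exact hdrop seg hseg

-- ===== VERDICT (by name: the statement is the Claim_ definition above) =====
theorem merge_closest_spec : Claim_equal_merge_closest := by
  intro segments max_distance _ hpre
  unfold Spec_merge_closest
  cases segments with
  | nil => rfl
  | cons s rest =>
    show mergeA max_distance rest s = _
    rw [← mergedRun_singleton s]
    apply key max_distance rest [s] (by simp) (by simp)
    · intro t ht
      exact hpre.1 t (mem_cons_dropLast s rest t ht)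
    · intro hrne t ht
      simp at ht
      have hmem : s ∈ (s :: rest).dropLast := by
        cases rest with
        | nil => exact absurd rfl hrne
        | cons a b => simp
      rw [ht]; exact hpre.1 s hmem
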